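-- pv_equiv track=rewrite | github.com/anand-bhat/test | docs/scripts/createDataSet.py | getExtraHostData
-- ===== SOURCE A (Python) =====
-- def getExtraHostData(jsonData, host, key):
--     defaultValue = '-'
--     for hostRecord in jsonData:
--         if host == hostRecord.get('host', ''):
--             return hostRecord.get(key, '')
--         if hostRecord.get('host', '') == '*':
--             defaultValue = hostRecord.get(key, '')
--     return defaultValue
-- ===== SOURCE B (Python) =====
-- def getExtraHostData(jsonData, host, key):
--     # One full pass folding a pair (first exact match, last '*' value); no early return.
--     def step(acc, r):
--         first, star = acc
--         h = r.get('host', '')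
--         if first is None and h == host:
--             first = r.get(key, '')
--         if h == '*':
--             star = r.get(key, '')
--         return (first, star)
--     first = None
--     star = None
--     for r in jsonData:
--         first, star = step((first, star), r)
--     if first is not None:
--         return first
--     if star is not None:
--         return star
--     return '-'
-- ===== Notes on version B (the rewrite author's own statement) =====
-- stated objective: alternative
-- what changed: Replaces A's early-returning loop with a mutable string default by a single exhaustive fold over a pair accumulator (first exact-host match kept first-wins, '*' value kept last-wins) resolved after the loop.
import Mathlib
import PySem

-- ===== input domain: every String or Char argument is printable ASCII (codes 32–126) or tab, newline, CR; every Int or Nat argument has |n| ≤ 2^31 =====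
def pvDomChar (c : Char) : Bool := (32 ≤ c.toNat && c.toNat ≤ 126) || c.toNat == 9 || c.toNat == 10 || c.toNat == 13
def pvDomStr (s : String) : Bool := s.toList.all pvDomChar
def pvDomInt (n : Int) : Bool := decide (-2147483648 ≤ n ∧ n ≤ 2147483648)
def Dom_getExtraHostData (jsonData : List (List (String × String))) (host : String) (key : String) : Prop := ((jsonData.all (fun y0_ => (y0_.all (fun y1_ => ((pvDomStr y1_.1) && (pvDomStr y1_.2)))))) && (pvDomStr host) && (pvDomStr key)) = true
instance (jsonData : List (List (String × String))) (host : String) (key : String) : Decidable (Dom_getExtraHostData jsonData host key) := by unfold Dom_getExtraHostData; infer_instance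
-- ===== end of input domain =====

-- B replaces A's early-returning loop (mutable string default) by one exhaustive fold over a pair
-- accumulator (first exact match first-wins, '*' value last-wins) resolved after the loop; same cost.
-- ===== PORT A =====
-- A's loop with early return: d is the running defaultValue.
def goA (host key : String) : List (List (String × String)) → String → String
  | [], d => d
  | r :: rs, d =>
    if host == ((r.lookup "host").getD "") then ((r.lookup key).getD "")
    else if ((r.lookup "host").getD "") == "*" then goA host key rs (((r.lookup key).getD ""))
    else goA host key rs d

def getExtraHostData (jsonData : List (List (String × String))) (host : String) (key : String) : String :=
  goA host key jsonData "-"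

-- ===== PORT B =====
-- Source B's step: updates (first, star) from one record.
def altStep (host key : String) (acc : Option String × Option String) (r : List (String × String)) :
    Option String × Option String :=
  let h := (r.lookup "host").getD ""
  let first := if acc.1.isNone && (h == host) then some ((r.lookup key).getD "") else acc.1
  let star := if h == "*" then some ((r.lookup key).getD "") else acc.2
  (first, star)

-- Source B's trailing if-chain.
def altResolve (p : Option String × Option String) : String :=
  match p.1 with
  | some v => v
  | none =>
    match p.2 with
    | some v => v
    | none => "-"

def getExtraHostData_alt (jsonData : List (List (String × String))) (host : String) (key : String) : String :=
  altResolve (jsonData.foldl (altStep host key) (none, none))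

-- ===== PRECONDITION & SPEC =====
def Spec_getExtraHostData (jsonData : List (List (String × String))) (host : String) (key : String) (out : String) : Prop := out = getExtraHostData_alt jsonData host key
instance (jsonData : List (List (String × String))) (host : String) (key : String) (out : String) : Decidable (Spec_getExtraHostData jsonData host key out) := by unfold Spec_getExtraHostData; infer_instance

-- ===== CLAIM =====
def Claim_equal_getExtraHostData : Prop := ∀ (jsonData : List (List (String × String))) (host : String) (key : String), Dom_getExtraHostData jsonData host key → Spec_getExtraHostData jsonData host key (getExtraHostData jsonData host key)

-- ===== LEMMAS AND PROOFS =====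
-- Resolution with an arbitrary final default (proof-only generalisation of altResolve).
def altResolve2 (p : Option String × Option String) (d : String) : String :=
  match p.1 with
  | some v => v
  | none => p.2.getD d

-- Once the first component is set, the fold never changes it.
theorem fold_first_some (host key : String) (rs : List (List (String × String))) (v : String)
    (s : Option String) :
    (rs.foldl (altStep host key) (some v, s)).1 = some v := by
  induction rs generalizing s with
  | nil => rfl
  | cons r rs ih => simpa [altStep] using ih _

-- Invariant linking the fold state to A's loop: the star slot plays the role of A's defaultValue.
theorem fold_goA (host key : String) (rs : List (List (String × String))) (s : Option String)
    (d : String) :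
    altResolve2 (rs.foldl (altStep host key) (none, s)) d = goA host key rs (s.getD d) := by
  induction rs generalizing s with
  | nil => cases s <;> rfl
  | cons r rs ih =>
    simp only [List.foldl_cons, goA, altStep, Option.isNone_none, Bool.true_and]
    by_cases h1 : host = ((r.lookup "host").getD "")
    · have : (((r.lookup "host").getD "") == host) = true := by simp [h1]
      simp only [h1, beq_self_eq_true, if_true]
      simp [altResolve2, fold_first_some]
    · have e1 : (((r.lookup "host").getD "") == host) = false := by
        simp [beq_eq_false_iff_ne]; exact fun h => h1 h.symm
      have e2 : (host == ((r.lookup "host").getD "")) = false := by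
        simp [beq_eq_false_iff_ne]; exact h1
      simp only [e1, e2, Bool.false_eq_true, if_false]
      by_cases h2 : ((r.lookup "host").getD "") = "*"
      · simp [h2, ih]
      · simp [h2, ih]

theorem altResolve_eq2 (p : Option String × Option String) :
    altResolve p = altResolve2 p "-" := by
  rcases p with ⟨f, s⟩
  cases f <;> cases s <;> rfl

-- ===== VERDICT =====
theorem getExtraHostData_spec : Claim_equal_getExtraHostData := by
  intro jsonData host key _
  unfold Spec_getExtraHostData getExtraHostData getExtraHostData_alt
  have h := fold_goA host key jsonData none "-"
  rw [altResolve_eq2, h]; rfl
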